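-- pv_equiv track=rewrite | github.com/bndeepankan/GameAI | problems01/connect_four.py | count_four
-- ===== SOURCE A (Python) =====
-- def count_four(S, p):
--     stack = []
--     arr = list(S)
--     n = len(S)
--     for i in range(n):
--         if arr[i] == p:
--             stack.append(p)
--         else:
--             while stack:
--                 stack.pop()
--         if sum(stack) * p == 4:
--             return True
--     return False
-- ===== SOURCE B (Python) =====
-- def count_four(S, p):
--     # run*p*p == 4 has an integer solution run >= 1 only for p*p == 4 (run == 1,
--     # i.e. a single p occurs) or p*p == 1 (run == 4, i.e. four consecutive p's).
--     if p * p == 4: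
--         return p in S
--     if p * p == 1:
--         return any(a == b == c == d == p for a, b, c, d in zip(S, S[1:], S[2:], S[3:]))
--     return False
-- ===== Notes on version B (the rewrite author's own statement) =====
-- stated objective: faster
-- what changed: B solves run*p*p==4 in closed form over the integers: it loops with no run/stack state at all, reducing the task to a membership test 'p in S' when p*p==4 and a sliding-window check for four consecutive p's (zip of four shifted views) when p*p==1, returning False for every other p.
import Mathlib
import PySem

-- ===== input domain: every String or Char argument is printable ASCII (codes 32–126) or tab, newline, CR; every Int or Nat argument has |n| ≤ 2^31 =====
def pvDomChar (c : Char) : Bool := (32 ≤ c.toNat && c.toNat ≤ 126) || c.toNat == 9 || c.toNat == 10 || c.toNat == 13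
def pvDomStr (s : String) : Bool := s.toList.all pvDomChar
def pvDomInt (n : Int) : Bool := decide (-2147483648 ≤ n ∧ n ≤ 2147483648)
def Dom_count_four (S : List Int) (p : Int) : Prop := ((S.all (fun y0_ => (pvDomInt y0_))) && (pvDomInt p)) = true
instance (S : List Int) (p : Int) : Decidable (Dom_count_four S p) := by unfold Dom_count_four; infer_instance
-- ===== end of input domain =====

-- B replaces A's stack loop by a case analysis on p: run*p*p == 4 is solvable only for
-- p*p == 4 (membership test) or p*p == 1 (four consecutive p's, a zip sliding window).

-- ===== PORT A =====
-- A's loop: stack state, push p or clear (while stack: pop), early return on sum(stack)*p == 4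
def count_four_go (p : Int) (stack : List Int) : List Int → Bool
  | [] => false
  | x :: xs =>
    let stack' := if x == p then stack ++ [p] else []
    if stack'.sum * p == 4 then true else count_four_go p stack' xs

def count_four (S : List Int) (p : Int) : Bool := count_four_go p [] S

-- ===== PORT B =====
def count_four_alt (S : List Int) (p : Int) : Bool :=
  if p * p == 4 then S.contains p
  else if p * p == 1 then
    (S.zip ((PySem.List.slice S (some 1) none).zip
      ((PySem.List.slice S (some 2) none).zip (PySem.List.slice S (some 3) none)))).any
      (fun z => z.1 == z.2.1 && z.2.1 == z.2.2.1 && z.2.2.1 == z.2.2.2 && z.2.2.2 == p)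
  else false

-- ===== PRECONDITION & SPEC =====
def Spec_count_four (S : List Int) (p : Int) (out : Bool) : Prop := out = count_four_alt S p
instance (S : List Int) (p : Int) (out : Bool) : Decidable (Spec_count_four S p out) := by unfold Spec_count_four; infer_instance

-- ===== CLAIM (what is proved, stated in full; the proofs are below) =====
def Claim_equal_count_four : Prop := ∀ (S : List Int) (p : Int), Dom_count_four S p → Spec_count_four S p (count_four S p)

-- ===== LEMMAS AND PROOFS =====

-- A's loop with the stack replaced by its length r (stack.sum = r * p); proof-internal helper
def runGo (p : Int) (r : Int) : List Int → Bool
  | [] => false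
  | x :: xs =>
    let r' := if x == p then r + 1 else 0
    if r' * p * p == 4 then true else runGo p r' xs

theorem go_eq_runGo (p : Int) (xs : List Int) : ∀ (stack : List Int) (r : Int),
    stack.sum = r * p → count_four_go p stack xs = runGo p r xs := by
  induction xs with
  | nil => intro stack r _; rfl
  | cons x xs ih =>
    intro stack r hsum
    simp only [count_four_go, runGo]
    by_cases hx : x = p
    · simp only [hx, beq_self_eq_true, if_true, List.sum_append, hsum, List.sum_cons,
        List.sum_nil, add_zero]
      have hc : (r * p + p) * p = (r + 1) * p * p := by ring
      rw [hc]
      split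
      · rfl
      · exact ih _ _ (by simp [List.sum_append, hsum]; ring)
    · simp only [beq_iff_eq, hx, if_false, List.sum_nil, zero_mul]
      split
      · rfl
      · exact ih [] 0 (by simp)

-- first k elements exist and all equal p
def allP (p : Int) : Nat → List Int → Bool
  | 0, _ => true
  | _ + 1, [] => false
  | k + 1, x :: xs => (x == p) && allP p k xs

-- B's window test as written in the port
def zipAny (p : Int) (S : List Int) : Bool :=
  (S.zip ((S.drop 1).zip ((S.drop 2).zip (S.drop 3)))).any
    (fun z => z.1 == z.2.1 && z.2.1 == z.2.2.1 && z.2.2.1 == z.2.2.2 && z.2.2.2 == p)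

theorem alt_eq (S : List Int) (p : Int) :
    count_four_alt S p =
      if p * p == 4 then S.contains p
      else if p * p == 1 then zipAny p S else false := by
  simp only [count_four_alt, zipAny, PySem.List.slice_from_one]
  have h2 : PySem.List.slice S (some 2) none = S.drop 2 := by
    have := PySem.List.slice_from_natCast S 2; simpa using this
  have h3 : PySem.List.slice S (some 3) none = S.drop 3 := by
    have := PySem.List.slice_from_natCast S 3; simpa using this
  rw [h2, h3, List.drop_one]

theorem chain4 (x b c d p : Int) :
    (x == b && (b == c && (c == d && d == p))) =
    (x == p && (b == p && (c == p && d == p))) := by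
  rw [Bool.eq_iff_iff]
  simp only [Bool.and_eq_true, beq_iff_eq]
  constructor <;> rintro ⟨h1, h2, h3, h4⟩ <;> subst_vars <;> exact ⟨rfl, rfl, rfl, rfl⟩

theorem zipAny_cons (p : Int) (x : Int) (xs : List Int) :
    zipAny p (x :: xs) = (allP p 4 (x :: xs) || zipAny p xs) := by
  match xs with
  | [] => simp [zipAny, allP]
  | [b] => simp [zipAny, allP]
  | [b, c] => simp [zipAny, allP]
  | b :: c :: d :: rest =>
    simp only [zipAny, allP, List.drop_succ_cons, List.drop_zero,
      List.zip_cons_cons, List.any_cons, Bool.and_assoc, Bool.and_true]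
    congr 1
    exact chain4 x b c d p

theorem allP_mono (p : Int) : ∀ (k m : Nat) (xs : List Int), k ≤ m →
    allP p m xs = true → allP p k xs = true := by
  intro k m
  induction m generalizing k with
  | zero => intro xs hk _; interval_cases k; rfl
  | succ m ih =>
    intro xs hk hm
    cases k with
    | zero => rfl
    | succ k =>
      cases xs with
      | nil => simp [allP] at hm
      | cons x xs =>
        simp only [allP, Bool.and_eq_true] at hm ⊢
        exact ⟨hm.1, ih k xs (by omega) hm.2⟩

theorem allP4_zipAny (p : Int) (xs : List Int) :
    allP p 4 xs = true → zipAny p xs = true := by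
  cases xs with
  | nil => intro h; simp [allP] at h
  | cons x xs => intro h; rw [zipAny_cons, h]; rfl

-- absorbing helper
theorem or_absorb_of_imp {a b : Bool} (h : b = true → a = true) : (a || b) = a := by
  cases a <;> cases b <;> simp_all

theorem runGo_sq1 (p : Int) (hp : p * p = 1) : ∀ (xs : List Int) (r : Int), 0 ≤ r → r ≤ 3 →
    runGo p r xs = (allP p (4 - r).toNat xs || zipAny p xs) := by
  intro xs
  induction xs with
  | nil =>
    intro r hr0 hr3
    obtain ⟨k, hk⟩ : ∃ k, (4 - r).toNat = k + 1 := ⟨(3 - r).toNat, by omega⟩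
    simp [runGo, hk, allP, zipAny]
  | cons x xs ih =>
    intro r hr0 hr3
    simp only [runGo]
    by_cases hx : x = p
    · simp only [hx, beq_self_eq_true, if_true]
      have hc : (r + 1) * p * p = r + 1 := by rw [mul_assoc, hp]; ring
      rw [hc]
      by_cases hr : r = 3
      · subst hr
        have h1 : (4 - (3:Int)).toNat = 1 := by norm_num
        simp [allP]
      · have hcond : ¬ ((r + 1 : Int) == 4) = true := by simp; omega
        rw [if_neg hcond]
        rw [ih (r + 1) (by omega) (by omega)]
        have hsplit : (4 - r).toNat = (3 - r).toNat + 1 := by omega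
        have hsplit2 : (4 - (r + 1)).toNat = (3 - r).toNat := by omega
        rw [hsplit, hsplit2, zipAny_cons]
        simp only [allP, beq_self_eq_true, Bool.true_and]
        rw [← Bool.or_assoc,
          or_absorb_of_imp (fun h => allP_mono p (3 - r).toNat 3 xs (by omega) h)]
    · have hxb : ¬ (x == p) = true := by simpa using hx
      rw [if_neg hxb]
      have h0 : (0 : Int) * p * p = 0 := by ring
      rw [h0]
      norm_num
      rw [ih 0 (by omega) (by omega)]
      obtain ⟨k, hk⟩ : ∃ k, (4 - r).toNat = k + 1 := ⟨(3 - r).toNat, by omega⟩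
      rw [hk, zipAny_cons]
      simp only [allP, hxb, Bool.false_and, Bool.false_or]
      have h40 : ((4:Int) - 0).toNat = 4 := rfl
      rw [h40, Bool.or_comm]
      exact or_absorb_of_imp (allP4_zipAny p xs)

theorem runGo_sq4 (p : Int) (hp : p * p = 4) : ∀ (xs : List Int),
    runGo p 0 xs = xs.contains p := by
  intro xs
  induction xs with
  | nil => rfl
  | cons x xs ih =>
    simp only [runGo]
    by_cases hx : x = p
    · have hcb : ((0 + 1) * p * p == 4) = true := by
        rw [beq_iff_eq, mul_assoc]; simpa using hp
      simp only [hx, beq_self_eq_true, if_true]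
      rw [if_pos hcb]
      simp
    · have hxb : ¬ (x == p) = true := by simpa using hx
      have hpx : (p == x) = false := by
        simp only [beq_eq_false_iff_ne, ne_eq]
        exact fun h => hx h.symm
      have h0 : (0 : Int) * p * p = 0 := by ring
      rw [List.contains_cons, hpx, Bool.false_or, ← ih]
      simp only [hxb]
      norm_num

theorem no_sol (p q : Int) (hq : 0 ≤ q) (h1 : p * p ≠ 1) (h4 : p * p ≠ 4) :
    q * p * p ≠ 4 := by
  intro h
  have hs : 0 ≤ p * p := mul_self_nonneg p
  rw [mul_assoc] at h
  rcases eq_or_lt_of_le hq with h0 | hpos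
  · rw [← h0] at h; simp at h
  · have hq1 : (1 : Int) ≤ q := hpos
    have hple : p * p ≤ 4 := by nlinarith
    have hl : -2 ≤ p := by nlinarith [sq_nonneg (p + 2), sq_nonneg (p - 2)]
    have hr : p ≤ 2 := by nlinarith [sq_nonneg (p + 2), sq_nonneg (p - 2)]
    interval_cases p <;> simp_all

theorem runGo_other (p : Int) (h1 : p * p ≠ 1) (h4 : p * p ≠ 4) :
    ∀ (xs : List Int) (r : Int), 0 ≤ r → runGo p r xs = false := by
  intro xs
  induction xs with
  | nil => intro r _; rfl
  | cons x xs ih =>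
    intro r hr
    simp only [runGo]
    by_cases hx : x = p
    · have hc : ¬ ((r + 1) * p * p == 4) = true := by
        simp; exact no_sol p (r + 1) (by omega) h1 h4
      simp only [hx, beq_self_eq_true, if_true]
      rw [if_neg hc]
      exact ih (r + 1) (by omega)
    · have hxb : ¬ (x == p) = true := by simpa using hx
      have hc : ¬ ((0:Int) * p * p == 4) = true := by norm_num
      rw [if_neg hxb, if_neg hc]
      exact ih 0 (by omega)

-- ===== VERDICT (by name: the statement is the Claim_ definition above) =====
theorem count_four_spec : Claim_equal_count_four := by
  intro S p _
  unfold Spec_count_four count_four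
  rw [go_eq_runGo p S [] 0 (by simp), alt_eq]
  by_cases h4 : p * p = 4
  · simp only [h4, beq_self_eq_true, if_true]
    exact runGo_sq4 p h4 S
  · by_cases h1 : p * p = 1
    · have hb4 : ¬ (p * p == 4) = true := by simpa using h4
      rw [if_neg hb4]
      have hb1 : (p * p == 1) = true := by simpa using h1
      rw [if_pos hb1]
      rw [runGo_sq1 p h1 S 0 (by omega) (by omega)]
      have h40 : ((4:Int) - 0).toNat = 4 := rfl
      rw [h40, Bool.or_comm]
      exact or_absorb_of_imp (allP4_zipAny p S)
    · have hb4 : ¬ (p * p == 4) = true := by simpa using h4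
      have hb1 : ¬ (p * p == 1) = true := by simpa using h1
      rw [if_neg hb4, if_neg hb1]
      exact runGo_other p h1 h4 S 0 (by omega)
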